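-- pv_equiv track=rewrite | github.com/jawaher-alqotym/Mini-Coding-Challenges | CoderHub-Add_words_toText.py | say_hi_bye
-- ===== SOURCE A (Python) =====
-- def say_hi_bye(name, num):
--     str1 = ''
--     list1 = []
--     list1.append(name)
--     list1.append(' ')
--     if (num == 0):
--         list1.append('Bye')
--
--     elif (num == 1):
--         list1.append('Hi')
--
--     for i in range(len(list1)):
--         str1 += list1.pop()
--
--     return str1
-- ===== SOURCE B (Python) =====
-- def say_hi_bye(name, num):
--     greeting = 'Bye' if num == 0 else ('Hi' if num == 1 else '')
--     return greeting + ' ' + name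
-- ===== Notes on version B (the rewrite author's own statement) =====
-- stated objective: simpler
-- what changed: Replaces the list-build-then-pop-reverse loop with a direct conditional choice of the greeting word and a single string concatenation.
import Mathlib
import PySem

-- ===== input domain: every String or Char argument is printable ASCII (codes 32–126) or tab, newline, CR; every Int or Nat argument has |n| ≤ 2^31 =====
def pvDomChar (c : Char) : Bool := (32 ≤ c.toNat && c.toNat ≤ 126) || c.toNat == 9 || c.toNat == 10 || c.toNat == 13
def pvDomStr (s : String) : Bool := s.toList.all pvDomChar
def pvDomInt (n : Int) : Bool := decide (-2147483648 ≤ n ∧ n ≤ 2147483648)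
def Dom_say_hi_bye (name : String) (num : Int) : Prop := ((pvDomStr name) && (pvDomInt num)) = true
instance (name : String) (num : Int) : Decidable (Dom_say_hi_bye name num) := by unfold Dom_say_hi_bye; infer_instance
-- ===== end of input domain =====

-- B replaces A's list-build-then-pop-reverse loop by a conditional greeting word and one concatenation (simpler).

-- ===== PORT A =====
-- A builds list1 = [name, ' '] (plus the greeting when num is 0 or 1), then pops
-- from the end len(list1) times, appending each popped string to str1.
-- Strings are carried as List Char (PySem convention); pop() never hits an empty
-- list here (the loop runs exactly len(list1) times), so getLast?.getD [] is exact.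
def say_hi_bye (name : String) (num : Int) : String :=
  let str1 : List Char := []
  let list1 : List (List Char) := [name.toList, [' ']]
  let list1 := if num == 0 then list1 ++ [['B','y','e']]
               else if num == 1 then list1 ++ [['H','i']]
               else list1
  let st := (List.range list1.length).foldl
    (fun (st : List Char × List (List Char)) _ =>
      (st.1 ++ (st.2.getLast?.getD []), st.2.dropLast)) (str1, list1)
  String.mk st.1

-- ===== PORT B =====
def say_hi_bye_alt (name : String) (num : Int) : String :=
  let greeting : List Char := if num == 0 then ['B','y','e']
                              else if num == 1 then ['H','i']
                              else []
  String.mk (greeting ++ ' ' :: name.toList)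

-- ===== PRECONDITION & SPEC =====
def Spec_say_hi_bye (name : String) (num : Int) (out : String) : Prop := out = say_hi_bye_alt name num
instance (name : String) (num : Int) (out : String) : Decidable (Spec_say_hi_bye name num out) := by unfold Spec_say_hi_bye; infer_instance

-- ===== CLAIM (what is proved, stated in full; the proofs are below) =====
def Claim_equal_say_hi_bye : Prop := ∀ (name : String) (num : Int), Dom_say_hi_bye name num → Spec_say_hi_bye name num (say_hi_bye name num)

-- ===== LEMMAS AND PROOFS =====

-- ===== VERDICT (by name: the statement is the Claim_ definition above) =====
theorem say_hi_bye_spec : Claim_equal_say_hi_bye := by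
  intro name num _
  unfold Spec_say_hi_bye say_hi_bye say_hi_bye_alt
  by_cases h0 : num = 0
  · simp [h0, List.range_succ]
  · by_cases h1 : num = 1
    · simp [h1, List.range_succ]
    · simp [h0, h1, List.range_succ]
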